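-- pv_equiv track=rewrite | github.com/Aitherium/aithershell | aithershell/platform/ui/commands.py | parse_multi_commands
-- ===== SOURCE A (Python) =====
-- def parse_multi_commands(input_str: str) -> list:
--     """
--     Parse multiple slash commands from a single line.
--
--     Examples:
--         "/mode unrestricted /safety low" -> ["/mode unrestricted", "/safety low"]
--         "/model gemini-pro" -> ["/model gemini-pro"]
--         "/help" -> ["/help"]
--
--     Returns a list of individual command strings.
--     """
--     input_str = input_str.strip()
--     if not input_str.startswith("/"):
--         return [input_str]
--
--     # Find all command starts (positions where / appears)
--     commands = []
--     current_start = 0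
--     i = 1  # Start after the first /
--
--     while i < len(input_str):
--         # Look for space followed by /
--         if input_str[i] == '/' and i > 0 and input_str[i-1] == ' ':
--             # Found a new command
--             cmd = input_str[current_start:i-1].strip()
--             if cmd:
--                 commands.append(cmd)
--             current_start = i
--         i += 1
--
--     # Add the last command
--     last_cmd = input_str[current_start:].strip()
--     if last_cmd:
--         commands.append(last_cmd)
--
--     return commands if commands else [input_str]
-- ===== SOURCE B (Python) =====
-- def parse_multi_commands(input_str: str) -> list:
--     """Split a line into individual slash commands (see original docstring)."""
--     s = input_str.strip()
--     if not s.startswith("/"):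
--         return [s]
--     head, *rest = s.split(" /")
--     return [head.strip()] + [("/" + p).strip() for p in rest]
-- ===== Notes on version B (the rewrite author's own statement) =====
-- stated objective: idiomatic
-- what changed: Replaces A's manual index-scanning while-loop (tracking current_start and testing s[i]/s[i-1] at every position) with a single str.split(' /') that cuts at each space-before-slash boundary, re-attaching the consumed '/' to each tail piece.
import Mathlib
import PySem

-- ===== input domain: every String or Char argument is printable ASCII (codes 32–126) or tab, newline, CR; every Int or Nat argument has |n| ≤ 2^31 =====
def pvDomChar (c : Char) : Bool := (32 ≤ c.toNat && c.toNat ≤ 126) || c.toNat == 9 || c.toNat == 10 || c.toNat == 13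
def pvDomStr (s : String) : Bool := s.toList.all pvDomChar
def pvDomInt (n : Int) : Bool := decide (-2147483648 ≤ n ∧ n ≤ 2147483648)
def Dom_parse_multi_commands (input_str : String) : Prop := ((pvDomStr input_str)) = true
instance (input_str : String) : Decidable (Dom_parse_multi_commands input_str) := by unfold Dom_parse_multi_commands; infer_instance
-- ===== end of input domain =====

-- B replaces A's index-scanning while-loop with a split on " /" plus re-attaching the consumed '/'; objective: more idiomatic, same cost.

-- ===== PORT A =====
-- A's while-loop: index i, current_start, accumulated commands
def pmcLoopA (cs : List Char) (i : Nat) (current_start : Nat) (commands : List String) : List String :=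
  if _h : i < cs.length then
    if PySem.List.pyGetD cs (i : Int) ' ' = '/' ∧ 0 < i ∧ PySem.List.pyGetD cs ((i : Int) - 1) ' ' = ' ' then
      let cmd := PySem.Chars.strip (PySem.List.slice cs (some (current_start : Int)) (some ((i : Int) - 1)))
      pmcLoopA cs (i + 1) i (if cmd ≠ [] then commands ++ [String.ofList cmd] else commands)
    else
      pmcLoopA cs (i + 1) current_start commands
  else
    let last_cmd := PySem.Chars.strip (PySem.List.slice cs (some (current_start : Int)) none)
    if last_cmd ≠ [] then commands ++ [String.ofList last_cmd] else commands
termination_by cs.length - i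

def parse_multi_commands (input_str : String) : List String :=
  let cs := PySem.Chars.strip input_str.toList
  if ¬ PySem.Chars.startswith cs ['/'] then [String.ofList cs]
  else
    let commands := pmcLoopA cs 1 0 []
    if commands ≠ [] then commands else [String.ofList cs]

-- ===== PORT B =====
def parse_multi_commands_alt (input_str : String) : List String :=
  let cs := PySem.Chars.strip input_str.toList
  if ¬ PySem.Chars.startswith cs ['/'] then [String.ofList cs]
  else
    match PySem.Chars.splitOn cs [' ', '/'] with
    | [] => []   -- unreachable: Python's str.split always yields at least one piece
    | head :: rest =>
        String.ofList (PySem.Chars.strip head) :: rest.map (fun p => String.ofList (PySem.Chars.strip ('/' :: p)))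

-- ===== PRECONDITION & SPEC =====
def Spec_parse_multi_commands (input_str : String) (out : List String) : Prop := out = parse_multi_commands_alt input_str
instance (input_str : String) (out : List String) : Decidable (Spec_parse_multi_commands input_str out) := by unfold Spec_parse_multi_commands; infer_instance

-- ===== CLAIM (what is proved, stated in full; the proofs are below) =====
def Claim_equal_parse_multi_commands : Prop := ∀ (input_str : String), Dom_parse_multi_commands input_str → Spec_parse_multi_commands input_str (parse_multi_commands input_str)

-- ===== LEMMAS AND PROOFS =====

-- structural version of splitOn cs [' ', '/']
def split2 : List Char → List (List Char)
  | [] => [[]]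
  | [c] => (split2 []).modifyHead (c :: ·)
  | c :: c2 :: rest =>
      if c = ' ' ∧ c2 = '/' then [] :: split2 rest
      else (split2 (c2 :: rest)).modifyHead (c :: ·)
termination_by l => l.length

def stripEmit (v : List Char) : List String :=
  if PySem.Chars.strip v ≠ [] then [String.ofList (PySem.Chars.strip v)] else []

-- structural version of A's scan: cur = current segment (reversed), r = remaining input
def scanA (cur : List Char) (r : List Char) : List String :=
  match r with
  | [] => stripEmit cur.reverse
  | [c] => scanA (c :: cur) []
  | c :: c2 :: rest =>
      if c = ' ' ∧ c2 = '/' then stripEmit cur.reverse ++ scanA ['/'] rest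
      else scanA (c :: cur) (c2 :: rest)
termination_by r.length

lemma split2_ne_nil (l : List Char) : split2 l ≠ [] := by
  induction l using split2.induct with
  | case1 => simp [split2]
  | case2 c => simp [split2]
  | case3 c c2 rest h ih => simp [split2, h]
  | case4 c c2 rest h ih =>
    rw [split2, if_neg (by tauto)]
    cases hs : split2 (c2 :: rest) with
    | nil => exact absurd hs ih
    | cons a b => simp

lemma go_eq_split2 : ∀ (fuel : Nat) (l cur : List Char) (acc : List (List Char)),
    l.length ≤ fuel →
    PySem.Chars.splitOn.go [' ', '/'] fuel l cur acc
      = acc.reverse ++ (split2 l).modifyHead (cur.reverse ++ ·) := by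
  intro fuel
  induction fuel with
  | zero =>
    intro l cur acc hl
    cases l with
    | nil => simp [PySem.Chars.splitOn.go, split2]
    | cons c t => simp at hl
  | succ fuel ih =>
    intro l cur acc hl
    cases l with
    | nil => simp [PySem.Chars.splitOn.go, split2]
    | cons c rest =>
      cases rest with
      | nil =>
        rw [PySem.Chars.splitOn.go]
        have hnp : [' ', '/'].isPrefixOf [c] = false := by simp [List.isPrefixOf]
        rw [hnp]
        simp only [Bool.false_eq_true, if_false]
        rw [ih [] (c :: cur) acc (by simp)]
        simp [split2, List.modifyHead]
      | cons c2 rest2 =>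
        by_cases hc : c = ' ' ∧ c2 = '/'
        · obtain ⟨rfl, rfl⟩ := hc
          rw [PySem.Chars.splitOn.go]
          have hp : [' ', '/'].isPrefixOf (' ' :: '/' :: rest2) = true := by simp [List.isPrefixOf]
          rw [hp]
          simp only [if_true]
          simp only [List.length_cons, List.length_nil, List.drop_succ_cons, List.drop_zero]
          rw [ih rest2 [] _ (by simp at hl ⊢; omega)]
          rw [split2, if_pos ⟨rfl, rfl⟩]
          simp only [List.modifyHead, List.reverse_nil, List.nil_append]
          cases split2 rest2 <;> simp
        · rw [PySem.Chars.splitOn.go]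
          have hnp : [' ', '/'].isPrefixOf (c :: c2 :: rest2) = false := by
            simp [List.isPrefixOf]; tauto
          rw [hnp]
          simp only [Bool.false_eq_true, if_false]
          rw [ih (c2 :: rest2) (c :: cur) acc (by simp at hl ⊢; omega)]
          rw [split2, if_neg hc]
          cases hs : split2 (c2 :: rest2) with
          | nil => exact absurd hs (split2_ne_nil _)
          | cons a b => simp

lemma splitOn_eq_split2 (cs : List Char) :
    PySem.Chars.splitOn cs [' ', '/'] = split2 cs := by
  rw [PySem.Chars.splitOn, go_eq_split2 _ _ _ _ (by omega)]
  cases hs : split2 cs with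
  | nil => exact absurd hs (split2_ne_nil _)
  | cons a b => simp

lemma split2_slash (l : List Char) : split2 ('/' :: l) = (split2 l).modifyHead ('/' :: ·) := by
  cases l with
  | nil => conv_lhs => rw [split2]
  | cons c2 rest => rw [split2, if_neg (by simp)]

lemma strip_eq_nil_iff (v : List Char) :
    PySem.Chars.strip v = [] ↔ ∀ c ∈ v, PySem.Chars.isspace c = true := by
  unfold PySem.Chars.strip PySem.Chars.rstrip PySem.Chars.lstrip
  constructor
  · intro h c hc
    by_contra hns
    have h1 : List.dropWhile PySem.Chars.isspace v ≠ [] := by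
      intro he
      rw [List.dropWhile_eq_nil_iff] at he
      exact hns (he c hc)
    have h2 := List.head_dropWhile_not (p := PySem.Chars.isspace) (l := v) h1
    rw [List.reverse_eq_nil_iff, List.dropWhile_eq_nil_iff] at h
    have hm : (List.dropWhile PySem.Chars.isspace v).head h1
        ∈ (List.dropWhile PySem.Chars.isspace v).reverse := by
      rw [List.mem_reverse]; exact List.head_mem h1
    exact absurd (h _ hm) (by simpa using h2)
  · intro h
    have h1 : List.dropWhile PySem.Chars.isspace v = [] := by
      rw [List.dropWhile_eq_nil_iff]; exact fun c hc => h c hc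
    simp [h1]

lemma strip_ne_nil_of_slash (t : List Char) : PySem.Chars.strip ('/' :: t) ≠ [] := by
  rw [Ne, strip_eq_nil_iff]
  intro h
  have := h '/' (by simp)
  simp [PySem.Chars.isspace] at this

lemma stripEmit_slash (t : List Char) :
    stripEmit ('/' :: t) = [String.ofList (PySem.Chars.strip ('/' :: t))] := by
  rw [stripEmit, if_pos (strip_ne_nil_of_slash t)]

lemma scanA_slash (cur r : List Char) : scanA cur ('/' :: r) = scanA ('/' :: cur) r := by
  cases r with
  | nil => conv_lhs => rw [scanA]
  | cons c2 rest => rw [scanA]; simp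

lemma scanA_eq_split2 : ∀ (r t : List Char),
    scanA ('/' :: t).reverse r
      = String.ofList (PySem.Chars.strip ('/' :: t ++ (split2 r).headI))
          :: (split2 r).tail.map (fun p => String.ofList (PySem.Chars.strip ('/' :: p))) := by
  intro r
  induction r using split2.induct with
  | case1 =>
    intro t
    rw [scanA]
    simp only [List.reverse_reverse]
    rw [stripEmit_slash]
    simp [split2]
  | case2 c =>
    intro t
    rw [scanA, scanA]
    have : (c :: ('/' :: t).reverse) = ('/' :: (t ++ [c])).reverse := by simp
    rw [this]
    simp only [List.reverse_reverse]
    rw [stripEmit_slash]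
    simp [split2]
  | case3 c c2 rest h ih =>
    intro t
    obtain ⟨rfl, rfl⟩ := h
    rw [scanA, if_pos ⟨rfl, rfl⟩]
    simp only [List.reverse_reverse]
    rw [stripEmit_slash]
    rw [split2, if_pos ⟨rfl, rfl⟩]
    have hih := ih ([] : List Char)
    simp only [List.reverse_cons, List.reverse_nil, List.nil_append] at hih
    rw [hih]
    cases hs : split2 rest with
    | nil => exact absurd hs (split2_ne_nil _)
    | cons a b => simp
  | case4 c c2 rest h ih =>
    intro t
    rw [scanA, if_neg h]
    have : (c :: ('/' :: t).reverse) = ('/' :: (t ++ [c])).reverse := by simp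
    rw [this, ih (t ++ [c])]
    rw [split2, if_neg h]
    cases hs : split2 (c2 :: rest) with
    | nil => exact absurd hs (split2_ne_nil _)
    | cons a b => simp

-- append-with-filter step of A equals appending stripEmit
lemma append_stripEmit (acc : List String) (v : List Char) :
    (if PySem.Chars.strip v ≠ [] then acc ++ [String.ofList (PySem.Chars.strip v)] else acc)
      = acc ++ stripEmit v := by
  rw [stripEmit]; split_ifs <;> simp

lemma loopA_eq_scanA (cs : List Char) : ∀ (n i start : Nat) (acc : List String),
    1 ≤ i → start < i → cs.length + 1 ≤ i + n →
    pmcLoopA cs i start acc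
      = acc ++ scanA (((cs.drop start).take (i - 1 - start)).reverse) (cs.drop (i - 1)) := by
  intro n
  induction n with
  | zero =>
    intro i start acc h1 h2 hn
    have hge : ¬ i < cs.length := by omega
    rw [pmcLoopA, dif_neg hge]
    have hdrop : cs.drop (i - 1) = [] := by
      apply List.drop_eq_nil_of_le; omega
    have htake : (cs.drop start).take (i - 1 - start) = cs.drop start := by
      apply List.take_of_length_le; simp; omega
    rw [hdrop, htake, scanA]
    simp only [List.reverse_reverse]
    rw [PySem.List.slice_from_natCast]
    exact append_stripEmit acc _
  | succ n ih =>
    intro i start acc h1 h2 hn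
    by_cases hlt : i < cs.length
    · have hi1 : i - 1 < cs.length := by omega
      have hdrop1 : cs.drop (i - 1) = cs[i - 1] :: cs.drop i := by
        rw [List.drop_eq_getElem_cons hi1]; congr 2; omega
      have hdrop2 : cs.drop i = cs[i] :: cs.drop (i + 1) :=
        List.drop_eq_getElem_cons hlt
      have hcast : ((i : Int) - 1) = ((i - 1 : Nat) : Int) := by omega
      have hgi : PySem.List.pyGetD cs (i : Int) ' ' = cs[i] := by
        rw [PySem.List.pyGetD_natCast, List.getD_eq_getElem _ _ hlt]
      have hgi1 : PySem.List.pyGetD cs ((i : Int) - 1) ' ' = cs[i - 1] := by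
        rw [hcast, PySem.List.pyGetD_natCast, List.getD_eq_getElem _ _ hi1]
      have hslice : PySem.List.slice cs (some (start : Int)) (some ((i : Int) - 1))
          = (cs.drop start).take (i - 1 - start) := by
        rw [hcast, PySem.List.slice_natCast]
      have htk : (cs.drop start).take (i - start) =
          (cs.drop start).take (i - 1 - start) ++ [cs[i - 1]] := by
        have hk : i - 1 - start < (cs.drop start).length := by simp; omega
        have h3 := List.take_concat_get (l := cs.drop start) (i := i - 1 - start) hk
        rw [List.concat_eq_append] at h3
        have hg : (cs.drop start)[i - 1 - start] = cs[i - 1] := by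
          rw [List.getElem_drop]; congr 1; omega
        rw [hg] at h3
        rw [h3]
        congr 1
        omega
      rw [pmcLoopA, dif_pos hlt]
      by_cases hcond : cs[i] = '/' ∧ cs[i - 1] = ' '
      · rw [if_pos (by rw [hgi, hgi1]; exact ⟨hcond.1, h1, hcond.2⟩)]
        simp only [hslice]
        rw [append_stripEmit, ih (i + 1) i _ (by omega) (by omega) (by omega)]
        have : (cs.drop i).take (i + 1 - 1 - i) = [] := by simp
        rw [this]
        simp only [List.reverse_nil, Nat.add_sub_cancel]
        rw [hdrop2, hcond.1, scanA_slash]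
        rw [hdrop1, hdrop2, hcond.1, hcond.2, scanA]
        rw [if_pos ⟨rfl, rfl⟩]
        simp only [List.reverse_reverse, List.append_assoc]
      · rw [if_neg (by rw [hgi, hgi1]; intro hx; exact hcond ⟨hx.1, hx.2.2⟩)]
        rw [ih (i + 1) start _ (by omega) (by omega) (by omega)]
        simp only [Nat.add_sub_cancel]
        rw [htk]
        conv_rhs => rw [hdrop1, hdrop2, scanA]
        rw [if_neg (by intro hx; exact hcond ⟨hx.2, hx.1⟩)]
        rw [← hdrop2]
        congr 1
        simp
    · rw [pmcLoopA, dif_neg hlt]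
      rw [PySem.List.slice_from_natCast]
      rw [append_stripEmit]
      congr 1
      by_cases hi : i - 1 < cs.length
      · have hdrop1 : cs.drop (i - 1) = [cs[i - 1]] := by
          rw [List.drop_eq_getElem_cons hi]
          congr 1
          apply List.drop_eq_nil_of_le; omega
        rw [hdrop1, scanA, scanA]
        simp only [List.reverse_cons, List.reverse_reverse]
        congr 1
        have hk : i - 1 - start < (cs.drop start).length := by simp; omega
        have h3 := List.take_concat_get (l := cs.drop start) (i := i - 1 - start) hk
        rw [List.concat_eq_append] at h3
        have hg : (cs.drop start)[i - 1 - start] = cs[i - 1] := by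
          rw [List.getElem_drop]; congr 1; omega
        have h2' : (cs.drop start).take (i - 1 - start + 1) = cs.drop start := by
          apply List.take_of_length_le; simp; omega
        rw [hg, h2'] at h3
        exact h3.symm
      · have hdrop : cs.drop (i - 1) = [] := by apply List.drop_eq_nil_of_le; omega
        have htake : (cs.drop start).take (i - 1 - start) = cs.drop start := by
          apply List.take_of_length_le; simp; omega
        rw [hdrop, htake, scanA]
        simp only [List.reverse_reverse]

-- ===== VERDICT (by name: the statement is the Claim_ definition above) =====
theorem parse_multi_commands_spec : Claim_equal_parse_multi_commands := by
  intro input_str _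
  unfold Spec_parse_multi_commands
  simp only [parse_multi_commands, parse_multi_commands_alt]
  generalize PySem.Chars.strip input_str.toList = cs
  by_cases hsw : PySem.Chars.startswith cs ['/'] = true
  · have hng : ¬¬ PySem.Chars.startswith cs ['/'] = true := by simp [hsw]
    rw [if_neg hng, if_neg hng]
    obtain ⟨cs', rfl⟩ : ∃ t, cs = '/' :: t := by
      obtain ⟨t, ht⟩ := (PySem.Chars.startswith_iff cs ['/']).mp hsw
      exact ⟨t, ht.symm⟩
    have hA : pmcLoopA ('/' :: cs') 1 0 [] = scanA [] ('/' :: cs') := by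
      have := loopA_eq_scanA ('/' :: cs') ('/' :: cs').length 1 0 [] (by omega) (by omega) (by omega)
      simpa using this
    rw [hA, scanA_slash]
    have hs2 := scanA_eq_split2 cs' []
    simp only [List.reverse_cons, List.reverse_nil, List.nil_append, List.cons_append] at hs2
    rw [hs2]
    rw [if_pos (by simp)]
    rw [splitOn_eq_split2, split2_slash]
    cases hsp : split2 cs' with
    | nil => exact absurd hsp (split2_ne_nil _)
    | cons a b => simp [List.modifyHead]
  · rw [if_pos hsw, if_pos hsw]
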